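-- pv_equiv track=rewrite | github.com/AP-MI-2021/lab-3-MariaBucura | main.py | get_longest_concat_is_prime
-- ===== SOURCE A (Python) =====
-- def is_prime(n):
--     nr = 0
--     for i in range(1, n + 1):
--         if n % i == 0:
--             nr = nr + 1
--     if nr == 2:
--         return True
--     else:
--         return False
--
-- def digit_number(n):
--     '''
--     determinarea numarului de cifre
--     :param n:
--     :return:
--     '''
--     nr = 1
--     while n > 9:
--         n = n // 10
--         nr = nr + 1
--     return nr
--
-- def concat_numbers(x, y):
--     '''
--     concatenarea a doua numere
--     :param x:
--     :param y:
--     :return: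
--     '''
--     nr = digit_number(y)
--     number = x
--     number = number * pow(10, nr) + y
--     return number
--
-- def get_longest_concat_is_prime(lst: list[int]) -> list[int]:
--     '''
--     functia cauta cea mai lunga subsecventa in care concatenarea subsecventei e numar prim.
--     rezultatul este construit in lista lst1
--     :param lst:
--     :return:
--     '''
--     lst1 = []
--     max = 1
--     for i in range(0, len(lst)):
--         concat = lst[i]
--         nr = 1
--         for j in range(i+1, len(lst)):
--             concat = concat_numbers(concat, lst[j])
--             nr = nr + 1
--             if nr > max and is_prime(concat) == True:
--                 lst1 = []
--                 for h in range(i, j + 1):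
--                     lst1.append(lst[h])
--                 max = nr
--     return lst1
-- ===== SOURCE B (Python) =====
-- def is_prime(n):
--     nr = 0
--     for i in range(1, n + 1):
--         if n % i == 0:
--             nr = nr + 1
--     if nr == 2:
--         return True
--     else:
--         return False
--
-- def digit_number(n):
--     nr = 1
--     while n > 9:
--         n = n // 10
--         nr = nr + 1
--     return nr
--
-- def concat_numbers(x, y):
--     nr = digit_number(y)
--     number = x
--     number = number * pow(10, nr) + y
--     return number
--
-- def get_longest_concat_is_prime(lst: list[int]) -> list[int]:
--     # descending candidate length with early return: first prime at the
--     # longest length (smallest start) is the answer.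
--     n = len(lst)
--     for length in range(n, 1, -1):
--         for i in range(0, n - length + 1):
--             sub = lst[i:i + length]
--             c = sub[0]
--             for v in sub[1:]:
--                 c = concat_numbers(c, v)
--             if is_prime(c):
--                 return sub
--     return []
-- ===== Notes on version B (the rewrite author's own statement) =====
-- stated objective: alternative
-- what changed: Replaces the ascending lexicographic scan that mutates a running maximum and rebuilds the result list element-by-element with a descending-candidate-length search that returns the first prime slice immediately (no max tracking, no result rebuilding); the arithmetic helpers is_prime/concat_numbers are kept identical.
import Mathlib
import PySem

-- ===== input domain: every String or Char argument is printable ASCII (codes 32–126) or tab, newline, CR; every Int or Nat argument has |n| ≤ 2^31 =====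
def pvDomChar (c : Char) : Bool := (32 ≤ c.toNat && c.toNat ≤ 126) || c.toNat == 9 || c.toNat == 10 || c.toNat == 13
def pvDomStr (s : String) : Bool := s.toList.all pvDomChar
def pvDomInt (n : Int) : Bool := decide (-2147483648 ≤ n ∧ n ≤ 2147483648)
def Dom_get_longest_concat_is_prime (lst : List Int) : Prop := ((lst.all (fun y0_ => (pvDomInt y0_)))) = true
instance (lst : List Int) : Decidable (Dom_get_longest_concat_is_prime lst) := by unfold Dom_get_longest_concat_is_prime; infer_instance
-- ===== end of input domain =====

-- B replaces A's ascending lexicographic scan (running maximum + element-wise result rebuilding)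
-- by a descending-candidate-length search returning the first prime slice; same return value.


-- ===== PORT A =====
def is_prime (n : Int) : Bool :=
  let nr := (PySem.List.pyRange 1 (n + 1) 1).foldl
    (fun nr i => if PySem.Int.mod n i == 0 then nr + 1 else nr) (0 : Int)
  nr == 2

def digit_loop (n nr : Int) : Int :=
  if h : 9 < n then
    digit_loop (PySem.Int.floordiv n 10) (nr + 1)
  else nr
termination_by n.toNat
decreasing_by
  have h10 : PySem.Int.floordiv n 10 = n / 10 := PySem.Int.floordiv_eq_ediv_of_pos (by omega)
  have h2 := Int.ediv_add_emod n 10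
  have h3 : 0 ≤ n % 10 := Int.emod_nonneg n (by norm_num)
  have h4 : n % 10 < 10 := Int.emod_lt_of_pos n (by norm_num)
  rw [h10]
  omega

def digit_number (n : Int) : Int := digit_loop n 1

def concat_numbers (x y : Int) : Int :=
  let nr := digit_number y
  x * 10 ^ nr.toNat + y

def get_longest_concat_is_prime (lst : List Int) : List Int :=
  ((PySem.List.pyRange 0 (lst.length : Int) 1).foldl (fun (st : List Int × Int) i =>
      let inner := (PySem.List.pyRange (i + 1) (lst.length : Int) 1).foldl
        (fun (s : Int × Int × List Int × Int) j =>
          let concat := concat_numbers s.1 (PySem.List.pyGetD lst j 0)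
          let nr := s.2.1 + 1
          if nr > s.2.2.2 && is_prime concat then
            (concat, nr,
              (PySem.List.pyRange i (j + 1) 1).foldl
                (fun acc h => acc ++ [PySem.List.pyGetD lst h 0]) [],
              nr)
          else
            (concat, nr, s.2.2.1, s.2.2.2))
        (PySem.List.pyGetD lst i 0, 1, st.1, st.2)
      (inner.2.2.1, inner.2.2.2))
    ([], 1)).1

-- ===== PORT B =====
-- `c = sub[0]; for v in sub[1:]: c = concat_numbers(c, v); is_prime(c)`; the [] branch is a
-- totality guard only (B never reaches it: every slice tested has length ≥ 2).
def alt_check (sub : List Int) : Bool :=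
  match sub with
  | [] => false
  | c :: rest => is_prime (rest.foldl concat_numbers c)

def alt_scan_i (lst : List Int) (L : Int) : List Int → Option (List Int)
  | [] => none
  | i :: rest =>
      let sub := PySem.List.slice lst (some i) (some (i + L))
      if alt_check sub then some sub else alt_scan_i lst L rest

def alt_scan_len (lst : List Int) : List Int → List Int
  | [] => []
  | L :: rest =>
      match alt_scan_i lst L (PySem.List.pyRange 0 ((lst.length : Int) - L + 1) 1) with
      | some s => s
      | none => alt_scan_len lst rest

def get_longest_concat_is_prime_alt (lst : List Int) : List Int :=
  alt_scan_len lst (PySem.List.pyRange (lst.length : Int) 1 (-1))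

-- ===== PRECONDITION & SPEC =====
def Spec_get_longest_concat_is_prime (lst : List Int) (out : List Int) : Prop := out = get_longest_concat_is_prime_alt lst
instance (lst : List Int) (out : List Int) : Decidable (Spec_get_longest_concat_is_prime lst out) := by unfold Spec_get_longest_concat_is_prime; infer_instance

-- ===== CLAIM (what is proved, stated in full; the proofs are below) =====
def Claim_equal_get_longest_concat_is_prime : Prop := ∀ (lst : List Int), Dom_get_longest_concat_is_prime lst → Spec_get_longest_concat_is_prime lst (get_longest_concat_is_prime lst)

-- ===== LEMMAS AND PROOFS =====

-- proof-side vocabulary ---------------------------------------------------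
def subL (lst : List Int) (i m : Nat) : List Int := (lst.drop i).take m
def catv (s : List Int) : Int :=
  match s with
  | [] => 0
  | x :: xs => xs.foldl concat_numbers x
def pAt (lst : List Int) (i m : Nat) : Bool := alt_check (subL lst i m)
def updP (lst : List Int) (s : List Int × Int) (q : Nat × Nat) : List Int × Int :=
  if decide (s.2 < (q.2 : Int)) && pAt lst q.1 q.2 then (subL lst q.1 q.2, (q.2 : Int)) else s
def fA (lst : List Int) (i : Nat) : List (Nat × Nat) :=
  List.map (fun L => (i, L)) (List.range' 2 (lst.length - i - 1))
def pairsA (lst : List Int) : List (Nat × Nat) :=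
  (List.range lst.length).flatMap (fA lst)

lemma updP_pos (lst : List Int) (s : List Int × Int) (q : Nat × Nat)
    (h1 : s.2 < (q.2 : Int)) (h2 : pAt lst q.1 q.2 = true) :
    updP lst s q = (subL lst q.1 q.2, (q.2 : Int)) := by
  unfold updP; simp [h1, h2]

lemma updP_neg_len (lst : List Int) (s : List Int × Int) (q : Nat × Nat)
    (h1 : ¬ s.2 < (q.2 : Int)) : updP lst s q = s := by
  unfold updP; simp [h1]

lemma updP_neg_p (lst : List Int) (s : List Int × Int) (q : Nat × Nat)
    (h2 : pAt lst q.1 q.2 = false) : updP lst s q = s := by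
  unfold updP; simp [h2]

-- pyRange ↦ Nat range' conversion
lemma pyRange_natCast' (a b : Nat) :
    PySem.List.pyRange (a : Int) (b : Int) 1 = List.map (fun k : Nat => (k : Int)) (List.range' a (b - a)) := by
  apply List.ext_getElem
  · rw [PySem.List.length_pyRange_one, List.length_map, List.length_range']; omega
  · intro k h1 h2
    rw [PySem.List.getElem_pyRange_one, List.getElem_map, List.getElem_range']
    push_cast; ring

lemma map_getD_range' (lst : List Int) (i m : Nat) (h : i + m ≤ lst.length) :
    List.map (fun h => lst.getD h 0) (List.range' i m) = subL lst i m := by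
  apply List.ext_getElem
  · simp [subL]; omega
  · intro k h1 h2
    simp at h1
    rw [List.getElem_map, List.getElem_range']
    simp [subL]
    rw [List.getElem?_eq_getElem (by omega)]
    rfl

lemma subL_append (lst : List Int) (i m : Nat) (h : i + m < lst.length) :
    subL lst i (m + 1) = subL lst i m ++ [lst.getD (i + m) 0] := by
  rw [← map_getD_range' lst i (m+1) (by omega), ← map_getD_range' lst i m (by omega),
      List.range'_1_concat, List.map_append]
  simp

lemma subL_one (lst : List Int) (i : Nat) (h : i < lst.length) :
    subL lst i 1 = [lst.getD i 0] := by
  rw [← map_getD_range' lst i 1 (by omega)]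
  simp

lemma catv_append (s : List Int) (a : Int) (h : s ≠ []) :
    catv (s ++ [a]) = concat_numbers (catv s) a := by
  match s with
  | [] => exact absurd rfl h
  | x :: xs => simp [catv, List.foldl_append]

lemma alt_check_eq (s : List Int) (h : s ≠ []) : alt_check s = is_prime (catv s) := by
  match s with
  | [] => exact absurd rfl h
  | x :: xs => simp [alt_check, catv]

lemma subL_ne_nil (lst : List Int) (i m : Nat) (h1 : i < lst.length) (h2 : 1 ≤ m) :
    subL lst i m ≠ [] := by
  simp [subL]
  constructor <;> omega

-- A-side bridge -----------------------------------------------------------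
lemma inner_bridge (lst : List Int) (k : Nat) :
    ∀ (i m : Nat) (acc : List Int × Int), 1 ≤ m → i + m + k ≤ lst.length →
    (List.map (fun t : Nat => (t : Int)) (List.range' (i + m) k)).foldl
      (fun (s : Int × Int × List Int × Int) j =>
        let concat := concat_numbers s.1 (PySem.List.pyGetD lst j 0)
        let nr := s.2.1 + 1
        if nr > s.2.2.2 && is_prime concat then
          (concat, nr,
            (PySem.List.pyRange (i : Int) (j + 1) 1).foldl
              (fun acc h => acc ++ [PySem.List.pyGetD lst h 0]) [],
            nr)
        else
          (concat, nr, s.2.2.1, s.2.2.2))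
      (catv (subL lst i m), (m : Int), acc.1, acc.2)
    = (catv (subL lst i (m + k)), ((m + k : Nat) : Int),
        (List.map (fun L => (i, L)) (List.range' (m + 1) k)).foldl (updP lst) acc) := by
  induction k with
  | zero =>
    intro i m acc _ _
    simp
  | succ k ih =>
    intro i m acc hm hlen
    rw [List.range'_succ, List.map_cons, List.foldl_cons]
    have hne : subL lst i m ≠ [] := subL_ne_nil lst i m (by omega) hm
    have hne' : subL lst i (m + 1) ≠ [] := subL_ne_nil lst i (m + 1) (by omega) (by omega)
    have hget : PySem.List.pyGetD lst ((i + m : Nat) : Int) 0 = lst.getD (i + m) 0 :=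
      PySem.List.pyGetD_natCast lst (i + m) 0
    have hcat : concat_numbers (catv (subL lst i m)) (lst.getD (i + m) 0)
        = catv (subL lst i (m + 1)) := by
      rw [subL_append lst i m (by omega), catv_append _ _ hne]
    have hprime : is_prime (catv (subL lst i (m + 1))) = pAt lst i (m + 1) :=
      (alt_check_eq (subL lst i (m + 1)) hne').symm
    have hnr : ((m : Int) + 1) = ((m + 1 : Nat) : Int) := by push_cast; ring
    have hlst1 : (PySem.List.pyRange (i : Int) (((i + m : Nat) : Int) + 1) 1).foldl
        (fun acc h => acc ++ [PySem.List.pyGetD lst h 0]) [] = subL lst i (m + 1) := by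
      have hr : (((i + m : Nat) : Int) + 1) = ((i + m + 1 : Nat) : Int) := by push_cast; ring
      rw [hr, pyRange_natCast' i (i + m + 1), PySem.List.foldl_append_singleton_eq_map,
        List.map_map]
      have : (fun h => lst.getD h 0) = ((fun h => PySem.List.pyGetD lst h 0) ∘ fun t : Nat => (t : Int)) := by
        funext t
        exact (PySem.List.pyGetD_natCast lst t 0).symm
      rw [show i + m + 1 - i = m + 1 by omega, ← this, map_getD_range' lst i (m + 1) (by omega)]
      rfl
    simp only [hget, hcat, hprime, hnr, hlst1]
    rw [show i + m + 1 = i + (m + 1) by omega,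
      List.range'_succ, List.map_cons, List.foldl_cons]
    by_cases hp : pAt lst i (m + 1) = true
    · by_cases hc : acc.2 < ((m + 1 : Nat) : Int)
      · have hcond : (decide (((m + 1 : Nat) : Int) > acc.2) && pAt lst i (m + 1)) = true := by
          rw [hp, Bool.and_true, decide_eq_true_eq]; exact hc
        rw [hcond, if_pos rfl, updP_pos lst acc (i, m + 1) hc hp]
        have := ih i (m + 1) (subL lst i (m + 1), ((m + 1 : Nat) : Int)) (by omega) (by omega)
        simp only [] at this
        rw [this, show m + 1 + k = m + (k + 1) by omega]
      · have hcond : (decide (((m + 1 : Nat) : Int) > acc.2) && pAt lst i (m + 1)) = false := by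
          rw [show decide (((m + 1 : Nat) : Int) > acc.2) = false from
            decide_eq_false_iff_not.mpr hc, Bool.false_and]
        rw [hcond, if_neg (by simp), updP_neg_len lst acc (i, m + 1) hc]
        rw [ih i (m + 1) acc (by omega) (by omega), show m + 1 + k = m + (k + 1) by omega]
    · have hp' : pAt lst i (m + 1) = false := by simpa using hp
      have hcond : (decide (((m + 1 : Nat) : Int) > acc.2) && pAt lst i (m + 1)) = false := by
        rw [hp', Bool.and_false]
      rw [hcond, if_neg (by simp), updP_neg_p lst acc (i, m + 1) hp']
      rw [ih i (m + 1) acc (by omega) (by omega), show m + 1 + k = m + (k + 1) by omega]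

lemma outer_bridge (lst : List Int) (m : Nat) :
    ∀ (a : Nat) (st : List Int × Int), a + m ≤ lst.length →
    (List.map (fun t : Nat => (t : Int)) (List.range' a m)).foldl
      (fun (st : List Int × Int) i =>
        let inner := (PySem.List.pyRange (i + 1) (lst.length : Int) 1).foldl
          (fun (s : Int × Int × List Int × Int) j =>
            let concat := concat_numbers s.1 (PySem.List.pyGetD lst j 0)
            let nr := s.2.1 + 1
            if nr > s.2.2.2 && is_prime concat then
              (concat, nr,
                (PySem.List.pyRange i (j + 1) 1).foldl
                  (fun acc h => acc ++ [PySem.List.pyGetD lst h 0]) [],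
                nr)
            else
              (concat, nr, s.2.2.1, s.2.2.2))
          (PySem.List.pyGetD lst i 0, 1, st.1, st.2)
        (inner.2.2.1, inner.2.2.2)) st
    = ((List.range' a m).flatMap (fA lst)).foldl (updP lst) st := by
  induction m with
  | zero => intro a st _; rfl
  | succ m ih =>
    intro a st hlen
    rw [List.range'_succ, List.map_cons, List.foldl_cons]
    have h1 : ((a : Int) + 1) = ((a + 1 : Nat) : Int) := by push_cast; ring
    have h3 : PySem.List.pyGetD lst ((a : Nat) : Int) 0 = catv (subL lst a 1) := by
      rw [PySem.List.pyGetD_natCast, subL_one lst a (by omega)]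
      rfl
    rw [h1, pyRange_natCast' (a + 1) lst.length, h3]
    have hib := inner_bridge lst (lst.length - (a + 1)) a 1 st le_rfl (by omega)
    simp only [Nat.cast_one] at hib
    rw [hib]
    rw [show (1 : Nat) + 1 = 2 from rfl, show lst.length - (a + 1) = lst.length - a - 1 by omega]
    rw [ih (a + 1) _ (by omega)]
    rw [List.flatMap_cons, List.foldl_append]
    simp only [Prod.mk.eta, fA]

lemma a_eq_pairs_fold (lst : List Int) :
    get_longest_concat_is_prime lst = ((pairsA lst).foldl (updP lst) ([], 1)).1 := by
  unfold get_longest_concat_is_prime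
  rw [PySem.List.pyRange_zero_natCast, List.range_eq_range']
  rw [outer_bridge lst lst.length 0 ([], 1) (by omega)]
  unfold pairsA
  rw [List.range_eq_range']

-- updP characterisation ---------------------------------------------------
lemma updP_no_update (lst : List Int) (qs : List (Nat × Nat)) :
    ∀ (s : List Int × Int), (∀ q ∈ qs, pAt lst q.1 q.2 = true → (q.2 : Int) ≤ s.2) →
    qs.foldl (updP lst) s = s := by
  induction qs with
  | nil => intro s hs; rfl
  | cons q qs ih =>
    intro s hs
    rw [List.foldl_cons]
    have hq : updP lst s q = s := by
      by_cases hp : pAt lst q.1 q.2 = true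
      · have hle := hs q (by simp) hp
        exact updP_neg_len lst s q (by omega)
      · exact updP_neg_p lst s q (by simpa using hp)
    rw [hq]
    exact ih s (fun q' h' => hs q' (by simp [h']))

lemma updP_bound (lst : List Int) (qs : List (Nat × Nat)) :
    ∀ (s : List Int × Int) (b : Int), s.2 ≤ b → (∀ q ∈ qs, pAt lst q.1 q.2 = true → (q.2 : Int) ≤ b) →
    (qs.foldl (updP lst) s).2 ≤ b := by
  induction qs with
  | nil => intro s b hb _; exact hb
  | cons q qs ih =>
    intro s b hb hq
    rw [List.foldl_cons]
    refine ih (updP lst s q) b ?_ (fun q' h' => hq q' (by simp [h']))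
    by_cases hp : pAt lst q.1 q.2 = true
    · by_cases hc : s.2 < (q.2 : Int)
      · rw [updP_pos lst s q hc hp]
        exact hq q (by simp) hp
      · rw [updP_neg_len lst s q hc]; exact hb
    · rw [updP_neg_p lst s q (by simpa using hp)]; exact hb

lemma updP_hit (lst : List Int) (qs1 qs2 : List (Nat × Nat)) (q : Nat × Nat) (s : List Int × Int)
    (hq : pAt lst q.1 q.2 = true) (hs : s.2 < (q.2 : Int))
    (h1 : ∀ q' ∈ qs1, pAt lst q'.1 q'.2 = true → q'.2 < q.2)
    (h2 : ∀ q' ∈ qs2, pAt lst q'.1 q'.2 = true → q'.2 ≤ q.2) :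
    (qs1 ++ q :: qs2).foldl (updP lst) s = (subL lst q.1 q.2, (q.2 : Int)) := by
  rw [List.foldl_append, List.foldl_cons]
  have hb : (qs1.foldl (updP lst) s).2 ≤ (q.2 : Int) - 1 := by
    refine updP_bound lst qs1 s ((q.2 : Int) - 1) (by omega) ?_
    intro q' h' hp
    have := h1 q' h' hp
    omega
  rw [updP_pos lst _ q (by omega) hq]
  refine updP_no_update lst qs2 _ ?_
  intro q' h' hp
  have := h2 q' h' hp
  simp only []
  exact_mod_cast Int.ofNat_le.mpr this

-- B-side ------------------------------------------------------------------
lemma scanI_none (lst : List Int) (L : Nat) (m : Nat) :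
    ∀ (a : Nat), (∀ k, a ≤ k → k < a + m → pAt lst k L = false) →
    alt_scan_i lst (L : Int) (List.map (fun t : Nat => (t : Int)) (List.range' a m)) = none := by
  induction m with
  | zero => intro a _; rfl
  | succ m ih =>
    intro a h
    rw [List.range'_succ, List.map_cons]
    have hsub : PySem.List.slice lst (some (a : Int)) (some ((a : Int) + (L : Int))) = subL lst a L := by
      rw [PySem.List.slice_natCast_add]; rfl
    have hchk : alt_check (subL lst a L) = false := h a le_rfl (by omega)
    simp only [alt_scan_i, hsub, hchk, Bool.false_eq_true, if_false]
    exact ih (a + 1) (fun k hk1 hk2 => h k (by omega) (by omega))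

lemma scanI_some (lst : List Int) (L : Nat) (m : Nat) :
    ∀ (a k0 : Nat), a ≤ k0 → k0 < a + m → pAt lst k0 L = true →
    (∀ k, a ≤ k → k < k0 → pAt lst k L = false) →
    alt_scan_i lst (L : Int) (List.map (fun t : Nat => (t : Int)) (List.range' a m)) = some (subL lst k0 L) := by
  induction m with
  | zero => intro a k0 h1 h2; omega
  | succ m ih =>
    intro a k0 h1 h2 hq hpre
    rw [List.range'_succ, List.map_cons]
    have hsub : PySem.List.slice lst (some (a : Int)) (some ((a : Int) + (L : Int))) = subL lst a L := by
      rw [PySem.List.slice_natCast_add]; rfl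
    by_cases hak : a = k0
    · subst hak
      have hq' : alt_check (subL lst a L) = true := hq
      simp only [alt_scan_i, hsub, hq', if_true]
    · have hchk : alt_check (subL lst a L) = false := hpre a le_rfl (by omega)
      simp only [alt_scan_i, hsub, hchk, Bool.false_eq_true, if_false]
      exact ih (a + 1) k0 (by omega) (by omega) hq (fun k hk1 hk2 => hpre k (by omega) hk2)

-- the B scan over the descending length list, parametrised by the current top length c
lemma scanLen_none (lst : List Int) (c : Nat) :
    c ≤ lst.length →
    (∀ L i, 2 ≤ L → L ≤ c → i + L ≤ lst.length → pAt lst i L = false) →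
    alt_scan_len lst (PySem.List.pyRange (c : Int) 1 (-1)) = [] := by
  induction c with
  | zero =>
    intro _ _
    rw [PySem.List.pyRange_neg_one_eq_nil (by omega)]
    rfl
  | succ c ih =>
    intro hcn h
    by_cases hc1 : c + 1 ≤ 1
    · rw [PySem.List.pyRange_neg_one_eq_nil (by exact_mod_cast hc1)]
      rfl
    · rw [PySem.List.pyRange_neg_one_cons (by exact_mod_cast (by omega : 1 < c + 1))]
      simp only [alt_scan_len]
      have harg : ((lst.length : Int) - ((c + 1 : Nat) : Int) + 1)
          = ((lst.length - (c + 1) + 1 : Nat) : Int) := by omega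
      rw [harg, show (0 : Int) = ((0 : Nat) : Int) by rfl, pyRange_natCast']
      rw [scanI_none lst (c + 1) (lst.length - (c + 1) + 1 - 0) 0
        (fun k hk1 hk2 => h (c + 1) k (by omega) le_rfl (by omega))]
      have hc : ((c + 1 : Nat) : Int) - 1 = ((c : Nat) : Int) := by omega
      rw [hc]
      exact ih (by omega) (fun L i hL1 hL2 hLn => h L i hL1 (by omega) hLn)

lemma scanLen_hit (lst : List Int) (Lstar istar : Nat)
    (hL2 : 2 ≤ Lstar) (hgood : istar + Lstar ≤ lst.length ∧ pAt lst istar Lstar = true)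
    (hmax : ∀ L i, Lstar < L → i + L ≤ lst.length → pAt lst i L = false)
    (hmin : ∀ i, i < istar → pAt lst i Lstar = false) :
    ∀ c, Lstar ≤ c → c ≤ lst.length →
    alt_scan_len lst (PySem.List.pyRange (c : Int) 1 (-1)) = subL lst istar Lstar := by
  intro c
  induction c with
  | zero => intro hc1 _; omega
  | succ c ih =>
    intro hc1 hc2
    rw [PySem.List.pyRange_neg_one_cons (by exact_mod_cast (by omega : 1 < c + 1))]
    simp only [alt_scan_len]
    have harg : ((lst.length : Int) - ((c + 1 : Nat) : Int) + 1)
        = ((lst.length - (c + 1) + 1 : Nat) : Int) := by omega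
    rw [harg, show (0 : Int) = ((0 : Nat) : Int) by rfl, pyRange_natCast']
    by_cases hEq : Lstar = c + 1
    · subst hEq
      rw [scanI_some lst (c + 1) (lst.length - (c + 1) + 1 - 0) 0 istar (by omega) (by omega)
        hgood.2 (fun k _ hk2 => hmin k hk2)]
    · rw [scanI_none lst (c + 1) (lst.length - (c + 1) + 1 - 0) 0
        (fun k hk1 hk2 => hmax (c + 1) k (by omega) (by omega))]
      have hc : ((c + 1 : Nat) : Int) - 1 = ((c : Nat) : Int) := by omega
      rw [hc]
      exact ih (by omega) (by omega)

lemma pairsA_mem (lst : List Int) (q : Nat × Nat) (h : q ∈ pairsA lst) :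
    2 ≤ q.2 ∧ q.1 + q.2 ≤ lst.length := by
  simp only [pairsA, fA, List.mem_flatMap, List.mem_range, List.mem_map, List.mem_range'] at h
  obtain ⟨i, hi, L, hL, rfl⟩ := h
  omega

-- ===== VERDICT (by name: the statement is the Claim_ definition above) =====
theorem get_longest_concat_is_prime_spec : Claim_equal_get_longest_concat_is_prime := by
  intro lst _
  unfold Spec_get_longest_concat_is_prime
  rw [a_eq_pairs_fold]
  show _ = alt_scan_len lst (PySem.List.pyRange (lst.length : Int) 1 (-1))
  classical
  by_cases hex : ∃ L i, 2 ≤ L ∧ i + L ≤ lst.length ∧ pAt lst i L = true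
  · obtain ⟨L0, i0, hL02, hi0, hp0⟩ := hex
    set P' : Nat → Prop :=
      fun L => 2 ≤ L ∧ ∃ i, i < lst.length ∧ i + L ≤ lst.length ∧ pAt lst i L = true with hP'
    have hPL0 : P' L0 := ⟨hL02, i0, by omega, hi0, hp0⟩
    set Lstar := Nat.findGreatest P' lst.length with hLs
    have hPstar : P' Lstar := Nat.findGreatest_spec (by omega) hPL0
    have hLsn : Lstar ≤ lst.length := Nat.findGreatest_le lst.length
    have hLmax : ∀ L i, Lstar < L → i + L ≤ lst.length → pAt lst i L = false := by
      intro L i hgt hle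
      by_contra hne
      have hp : pAt lst i L = true := by
        cases hb : pAt lst i L
        · exact absurd hb hne
        · rfl
      exact Nat.findGreatest_is_greatest hgt (by omega) ⟨by omega, i, by omega, hle, hp⟩
    have hEx : ∃ i, i + Lstar ≤ lst.length ∧ pAt lst i Lstar = true := by
      obtain ⟨_, i, _, hle, hp⟩ := hPstar
      exact ⟨i, hle, hp⟩
    set istar := Nat.find hEx with hIs
    have histar : istar + Lstar ≤ lst.length ∧ pAt lst istar Lstar = true := Nat.find_spec hEx
    have hmin : ∀ i, i < istar → pAt lst i Lstar = false := by
      intro i hi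
      have hnm := Nat.find_min hEx hi
      cases hb : pAt lst i Lstar
      · rfl
      · exact absurd ⟨by omega, hb⟩ hnm
    have hL2 : 2 ≤ Lstar := hPstar.1
    -- B side
    rw [scanLen_hit lst Lstar istar hL2 histar hLmax hmin lst.length (by omega) le_rfl]
    -- A side: split the pair list at (istar, Lstar)
    have e1 : List.range' 0 lst.length = List.range' 0 istar ++ List.range' istar (lst.length - istar) := by
      have h := @List.range'_append 0 istar (lst.length - istar) 1
      simp only [Nat.zero_add, Nat.one_mul] at h
      rw [Nat.add_sub_cancel' (by omega : istar ≤ lst.length)] at h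
      exact h.symm
    have e2 : List.range' istar (lst.length - istar)
        = istar :: List.range' (istar + 1) (lst.length - istar - 1) := by
      rw [← List.range'_succ, show lst.length - istar - 1 + 1 = lst.length - istar by omega]
    have e3 : List.range' 2 (lst.length - istar - 1)
        = List.range' 2 (Lstar - 2)
          ++ Lstar :: List.range' (Lstar + 1) (lst.length - istar - 1 - (Lstar - 1)) := by
      have h := @List.range'_append 2 (Lstar - 2) (lst.length - istar - 1 - (Lstar - 2)) 1
      simp only [Nat.one_mul] at h
      rw [show 2 + (Lstar - 2) = Lstar by omega] at h
      rw [show (Lstar - 2) + (lst.length - istar - 1 - (Lstar - 2)) = lst.length - istar - 1 by omega] at h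
      rw [← h]
      congr 1
      rw [show lst.length - istar - 1 - (Lstar - 2) = (lst.length - istar - 1 - (Lstar - 1)) + 1 by omega,
        List.range'_succ]
    have hsplit : pairsA lst
        = ((List.range' 0 istar).flatMap (fA lst)
            ++ List.map (fun L => (istar, L)) (List.range' 2 (Lstar - 2)))
          ++ (istar, Lstar)
            :: (List.map (fun L => (istar, L)) (List.range' (Lstar + 1) (lst.length - istar - 1 - (Lstar - 1)))
              ++ (List.range' (istar + 1) (lst.length - istar - 1)).flatMap (fA lst)) := by
      rw [pairsA, List.range_eq_range', e1, List.flatMap_append, e2, List.flatMap_cons]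
      rw [show fA lst istar = List.map (fun L => (istar, L)) (List.range' 2 (lst.length - istar - 1)) from rfl,
        e3, List.map_append, List.map_cons]
      simp [List.append_assoc]
    rw [hsplit, updP_hit lst _ _ (istar, Lstar) ([], 1) histar.2 (by exact_mod_cast by omega) ?h1 ?h2]
    case h1 =>
      intro q' hq' hp'
      rcases List.mem_append.mp hq' with hq1 | hq2
      · simp only [List.mem_flatMap, List.mem_range'] at hq1
        obtain ⟨i, hi, hqf⟩ := hq1
        simp only [fA, List.mem_map, List.mem_range'] at hqf
        obtain ⟨L, hL, rfl⟩ := hqf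
        have hiLn : i + L ≤ lst.length := by omega
        have hle : L ≤ Lstar := by
          by_contra hgt
          have := hLmax L i (by omega) hiLn
          simp [this] at hp'
        rcases Nat.lt_or_ge L Lstar with h | h
        · exact h
        · exfalso
          have hLL : L = Lstar := by omega
          subst hLL
          have := hmin i (by omega)
          simp [this] at hp'
      · simp only [List.mem_map, List.mem_range'] at hq2
        obtain ⟨L, hL, rfl⟩ := hq2
        simp only []
        omega
    case h2 =>
      intro q' hq' hp'
      rcases List.mem_append.mp hq' with hq1 | hq2
      · simp only [List.mem_map, List.mem_range'] at hq1
        obtain ⟨L, hL, rfl⟩ := hq1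
        exfalso
        have hiLn : istar + L ≤ lst.length := by omega
        have := hLmax L istar (by omega) hiLn
        simp [this] at hp'
      · simp only [List.mem_flatMap, List.mem_range'] at hq2
        obtain ⟨i, hi, hqf⟩ := hq2
        simp only [fA, List.mem_map, List.mem_range'] at hqf
        obtain ⟨L, hL, rfl⟩ := hqf
        have hiLn : i + L ≤ lst.length := by omega
        by_contra hgt
        have := hLmax L i (by omega) hiLn
        simp [this] at hp'
  · push_neg at hex
    have hall : ∀ L i, 2 ≤ L → L ≤ lst.length → i + L ≤ lst.length → pAt lst i L = false := by
      intro L i h2 _ hle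
      cases hb : pAt lst i L
      · rfl
      · exact absurd hb (hex L i h2 hle)
    rw [scanLen_none lst lst.length le_rfl hall]
    rw [updP_no_update lst (pairsA lst) ([], 1) ?hno]
    case hno =>
      intro q hq hp
      obtain ⟨h2, hle⟩ := pairsA_mem lst q hq
      have := hall q.2 q.1 h2 (by omega) hle
      rw [this] at hp
      exact absurd hp (by simp)
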